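-- pv_equiv track=rewrite | github.com/CTG813819/lvl_up | ai-backend-python/app/services/enhanced_scenario_service.py | _extract_target_types_from_weapon
-- ===== SOURCE A (Python) =====
-- from typing import Dict, Any, List, Optional, Set
--
-- def _extract_target_types_from_weapon(weapon: dict, parent_weapons: List[dict]) -> Set[str]:
--     """Extract target types from weapon and its parent weapons"""
--     target_types = set()
--
--     # Check weapon category
--     category = weapon.get("category", "").lower()
--     if "wifi" in category or "wireless" in category:
--         target_types.add("wifi_network")
--     if "network" in category or "ip" in category:
--         target_types.add("ip_address")
--     if "web" in category:
--         target_types.add("web_url")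
--     if "credential" in category:
--         target_types.add("domain")
--     if "brute_force" in category:
--         target_types.add("port")
--
--     # Check parent weapons
--     for parent in parent_weapons:
--         parent_category = parent.get("category", "").lower()
--         if "wifi" in parent_category or "wireless" in parent_category:
--             target_types.add("wifi_network")
--         if "network" in parent_category or "ip" in parent_category:
--             target_types.add("ip_address")
--         if "web" in parent_category:
--             target_types.add("web_url")
--         if "credential" in parent_category:
--             target_types.add("domain")
--         if "brute_force" in parent_category:
--             target_types.add("port")
--
--     return target_types if target_types else {"ip_address", "web_url", "wifi_network"}
-- ===== SOURCE B (Python) =====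
-- # B: recursive ordered-merge. For each weapon compute its matched targets as a
-- # filtered rule list, then combine the per-weapon lists front-to-back with a
-- # first-occurrence dedup merge -- no mutable set accumulator during the scan.
-- RULES = [
--     ("wifi_network", ("wifi", "wireless")),
--     ("ip_address", ("network", "ip")),
--     ("web_url", ("web",)),
--     ("domain", ("credential",)),
--     ("port", ("brute_force",)),
-- ]
--
-- def _extract_target_types_from_weapon(weapon, parent_weapons):
--     def matches(w):
--         cat = w.get("category", "").lower()
--         return [t for t, kws in RULES if any(k in cat for k in kws)]
--
--     def merge(ws):
--         if not ws:
--             return []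
--         head = matches(ws[0])
--         rest = merge(ws[1:])
--         return head + [t for t in rest if t not in head]
--
--     ordered = merge([weapon, *parent_weapons])
--     return set(ordered) if ordered else {"ip_address", "web_url", "wifi_network"}
-- ===== Notes on version B (the rewrite author's own statement) =====
-- stated objective: alternative
-- what changed: Instead of A's stateful scan that mutates one set through two copies of a five-branch if-chain, B computes each weapon's matched targets as a filtered rule list and combines the per-weapon lists by structural recursion with a first-occurrence dedup merge, with no accumulator threaded through the scan.
import Mathlib
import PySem

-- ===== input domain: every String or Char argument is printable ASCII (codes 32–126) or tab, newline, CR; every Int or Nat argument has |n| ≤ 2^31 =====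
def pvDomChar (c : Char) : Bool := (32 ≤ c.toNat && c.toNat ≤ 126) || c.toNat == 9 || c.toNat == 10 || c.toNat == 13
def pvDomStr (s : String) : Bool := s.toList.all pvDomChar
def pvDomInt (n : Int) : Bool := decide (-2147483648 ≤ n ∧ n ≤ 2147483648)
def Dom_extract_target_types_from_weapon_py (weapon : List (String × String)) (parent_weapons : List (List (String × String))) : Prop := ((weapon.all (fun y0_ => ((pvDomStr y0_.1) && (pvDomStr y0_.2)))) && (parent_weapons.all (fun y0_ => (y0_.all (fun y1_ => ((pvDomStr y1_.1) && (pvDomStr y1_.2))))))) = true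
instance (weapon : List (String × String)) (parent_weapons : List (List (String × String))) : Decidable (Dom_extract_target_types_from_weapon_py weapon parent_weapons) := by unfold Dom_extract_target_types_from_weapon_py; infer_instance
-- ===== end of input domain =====

-- B replaces A's stateful set-accumulator scan (two copies of a five-branch if-chain) by a structural recursion that merges per-weapon matched-rule lists with a first-occurrence dedup (alternative decomposition, same cost).


-- ===== PORT A =====
-- literal transliteration of A: inline if-chain for the weapon, then the same
-- chain repeated in the loop over parents, then the empty-set fallback.
def extract_target_types_from_weapon_py (weapon : List (String × String)) (parent_weapons : List (List (String × String))) : List String :=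
  let target_types : PySem.Set String := PySem.Set.empty
  let category := PySem.Str.lower (PySem.Dict.getD (PySem.Dict.mk weapon) "category" "")
  let target_types := if PySem.Str.isIn "wifi" category || PySem.Str.isIn "wireless" category then PySem.Set.add target_types "wifi_network" else target_types
  let target_types := if PySem.Str.isIn "network" category || PySem.Str.isIn "ip" category then PySem.Set.add target_types "ip_address" else target_types
  let target_types := if PySem.Str.isIn "web" category then PySem.Set.add target_types "web_url" else target_types
  let target_types := if PySem.Str.isIn "credential" category then PySem.Set.add target_types "domain" else target_types
  let target_types := if PySem.Str.isIn "brute_force" category then PySem.Set.add target_types "port" else target_types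
  let target_types := parent_weapons.foldl (fun target_types parent =>
    let parent_category := PySem.Str.lower (PySem.Dict.getD (PySem.Dict.mk parent) "category" "")
    let target_types := if PySem.Str.isIn "wifi" parent_category || PySem.Str.isIn "wireless" parent_category then PySem.Set.add target_types "wifi_network" else target_types
    let target_types := if PySem.Str.isIn "network" parent_category || PySem.Str.isIn "ip" parent_category then PySem.Set.add target_types "ip_address" else target_types
    let target_types := if PySem.Str.isIn "web" parent_category then PySem.Set.add target_types "web_url" else target_types
    let target_types := if PySem.Str.isIn "credential" parent_category then PySem.Set.add target_types "domain" else target_types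
    if PySem.Str.isIn "brute_force" parent_category then PySem.Set.add target_types "port" else target_types) target_types
  if target_types = [] then PySem.Set.ofList ["ip_address", "web_url", "wifi_network"] else target_types

-- ===== PORT B =====
-- Source B's RULES table
def pvRules : List (String × List String) :=
  [("wifi_network", ["wifi", "wireless"]),
   ("ip_address", ["network", "ip"]),
   ("web_url", ["web"]),
   ("domain", ["credential"]),
   ("port", ["brute_force"])]

-- Source B's `matches`: targets of the rules whose keywords hit w's category
def pvMatches (w : List (String × String)) : List String :=
  let cat := PySem.Str.lower (PySem.Dict.getD (PySem.Dict.mk w) "category" "")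
  (pvRules.filter (fun r => r.2.any (fun k => PySem.Str.isIn k cat))).map Prod.fst

-- Source B's `merge`: structural recursion, first-occurrence dedup concatenation
def pvMerge : List (List (String × String)) → List String
  | [] => []
  | w :: ws =>
    let head := pvMatches w
    let rest := pvMerge ws
    head ++ rest.filter (fun t => !head.contains t)

def extract_target_types_from_weapon_py_alt (weapon : List (String × String)) (parent_weapons : List (List (String × String))) : List String :=
  let ordered := pvMerge (weapon :: parent_weapons)
  if ordered = [] then PySem.Set.ofList ["ip_address", "web_url", "wifi_network"]
  else PySem.Set.ofList ordered

-- ===== PRECONDITION & SPEC =====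
def Spec_extract_target_types_from_weapon_py (weapon : List (String × String)) (parent_weapons : List (List (String × String))) (out : List String) : Prop := out = extract_target_types_from_weapon_py_alt weapon parent_weapons
instance (weapon : List (String × String)) (parent_weapons : List (List (String × String))) (out : List String) : Decidable (Spec_extract_target_types_from_weapon_py weapon parent_weapons out) := by unfold Spec_extract_target_types_from_weapon_py; infer_instance

-- ===== CLAIM (what is proved, stated in full; the proofs are below) =====
def Claim_equal_extract_target_types_from_weapon_py : Prop := ∀ (weapon : List (String × String)) (parent_weapons : List (List (String × String))), Dom_extract_target_types_from_weapon_py weapon parent_weapons → Spec_extract_target_types_from_weapon_py weapon parent_weapons (extract_target_types_from_weapon_py weapon parent_weapons)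

-- ===== LEMMAS AND PROOFS =====

-- A's five-branch if-chain for one category, as a function (proof helper only)
def pvChain (s : PySem.Set String) (c : String) : PySem.Set String :=
  let t := if PySem.Str.isIn "wifi" c || PySem.Str.isIn "wireless" c then PySem.Set.add s "wifi_network" else s
  let t := if PySem.Str.isIn "network" c || PySem.Str.isIn "ip" c then PySem.Set.add t "ip_address" else t
  let t := if PySem.Str.isIn "web" c then PySem.Set.add t "web_url" else t
  let t := if PySem.Str.isIn "credential" c then PySem.Set.add t "domain" else t
  if PySem.Str.isIn "brute_force" c then PySem.Set.add t "port" else t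

def pvMatchesCat (c : String) : List String :=
  (pvRules.filter (fun r => r.2.any (fun k => PySem.Str.isIn k c))).map Prod.fst

theorem pvMatches_eq (w : List (String × String)) :
    pvMatches w = pvMatchesCat (PySem.Str.lower (PySem.Dict.getD (PySem.Dict.mk w) "category" "")) := rfl

theorem pvMatchesCat_nodup (c : String) : (pvMatchesCat c).Nodup := by
  have hsub : (pvMatchesCat c).Sublist (pvRules.map Prod.fst) :=
    List.Sublist.map Prod.fst List.filter_sublist
  exact (by decide : (pvRules.map Prod.fst).Nodup).sublist hsub

theorem pvChain_eq_foldl (s : PySem.Set String) (c : String) :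
    pvChain s c = List.foldl PySem.Set.add s (pvMatchesCat c) := by
  simp only [pvChain, pvMatchesCat, pvRules]
  cases h1 : (PySem.Str.isIn "wifi" c || PySem.Str.isIn "wireless" c) <;>
  cases h2 : (PySem.Str.isIn "network" c || PySem.Str.isIn "ip" c) <;>
  cases h3 : PySem.Str.isIn "web" c <;>
  cases h4 : PySem.Str.isIn "credential" c <;>
  cases h5 : PySem.Str.isIn "brute_force" c <;>
  simp_all [List.any_cons, List.any_nil, Bool.or_false, List.foldl]

theorem foldl_add_eq_append_filter (m : List String) (s : PySem.Set String)
    (hm : m.Nodup) :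
    List.foldl PySem.Set.add s m = s ++ m.filter (fun t => !s.contains t) := by
  induction m generalizing s with
  | nil => simp
  | cons a m ih =>
    have hnotin : a ∉ m := (List.nodup_cons.mp hm).1
    rw [List.foldl_cons, ih _ (List.nodup_cons.mp hm).2]
    by_cases ha : a ∈ s
    · have : PySem.Set.add s a = s := by simp [PySem.Set.add, PySem.Set.contains, ha]
      rw [this, List.filter_cons]
      simp [ha]
    · have : PySem.Set.add s a = s ++ [a] := by simp [PySem.Set.add, PySem.Set.contains, ha]
      rw [this, List.filter_cons]
      have hcond : (!s.contains a) = true := by simp [ha]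
      rw [if_pos hcond, List.append_assoc, List.singleton_append]
      congr 1
      congr 1
      refine List.filter_congr fun t ht => ?_
      have hta : t ≠ a := fun h => hnotin (h ▸ ht)
      simp [hta]

theorem pvChain_eq (s : PySem.Set String) (c : String) :
    pvChain s c = s ++ (pvMatchesCat c).filter (fun t => !s.contains t) := by
  rw [pvChain_eq_foldl]
  exact foldl_add_eq_append_filter _ _ (pvMatchesCat_nodup c)

theorem pvMerge_nodup (ws : List (List (String × String))) : (pvMerge ws).Nodup := by
  induction ws with
  | nil => simp [pvMerge]
  | cons w ws ih =>
    simp only [pvMerge]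
    refine List.Nodup.append ?_ (ih.filter _) ?_
    · rw [pvMatches_eq]; exact pvMatchesCat_nodup _
    · intro t ht1 ht2
      have := List.of_mem_filter ht2
      simp [List.contains_eq_mem, ht1] at this

-- main invariant: A's fold over categories from accumulator s = s ++ merge-result minus s
theorem fold_eq_merge (ws : List (List (String × String))) (s : PySem.Set String) :
    List.foldl (fun t w => pvChain t (PySem.Str.lower (PySem.Dict.getD (PySem.Dict.mk w) "category" ""))) s ws
      = s ++ (pvMerge ws).filter (fun t => !s.contains t) := by
  induction ws generalizing s with
  | nil => simp [pvMerge]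
  | cons w ws ih =>
    rw [List.foldl_cons, ih, pvChain_eq]
    simp only [pvMerge, ← pvMatches_eq]
    rw [List.filter_append, List.append_assoc]
    congr 1
    rw [List.filter_filter]
    congr 1
    apply List.filter_congr
    intro t _
    simp only [List.contains_eq_mem]
    by_cases h1 : t ∈ s <;> by_cases h2 : t ∈ pvMatches w <;> simp [h1, h2]

theorem ofList_of_nodup (xs : List String) (h : xs.Nodup) : PySem.Set.ofList xs = xs := by
  rw [PySem.Set.ofList_eq_foldl, foldl_add_eq_append_filter _ _ h]
  simp

-- ===== VERDICT (by name: the statement is the Claim_ definition above) =====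
theorem extract_target_types_from_weapon_py_spec : Claim_equal_extract_target_types_from_weapon_py := by
  intro weapon parent_weapons _
  unfold Spec_extract_target_types_from_weapon_py
  have h1 : extract_target_types_from_weapon_py weapon parent_weapons =
      (let r := List.foldl (fun t w => pvChain t (PySem.Str.lower (PySem.Dict.getD (PySem.Dict.mk w) "category" ""))) PySem.Set.empty (weapon :: parent_weapons)
       if r = [] then PySem.Set.ofList ["ip_address", "web_url", "wifi_network"] else r) := rfl
  rw [h1, fold_eq_merge]
  unfold extract_target_types_from_weapon_py_alt
  by_cases h : pvMerge (weapon :: parent_weapons) = [] <;>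
    simp [h, PySem.Set.empty, ofList_of_nodup _ (pvMerge_nodup (weapon :: parent_weapons))]
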